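-- pv_equiv track=rewrite | github.com/evelinamorim/wordembedding | util.py | read_tag_type
-- ===== SOURCE A (Python) =====
-- def read_tag_type(tag_str):
--      i = 0
--      n = len(tag_str)
--      tag_type = ''
--      while (i<n):
--          if (tag_str[i]==' ' or tag_str[i]=='>'):
--              break
--          else:
--             if (tag_str[i]!='<'):
--                 tag_type = tag_type + tag_str[i]
--          i = i + 1
--      return tag_type
-- ===== SOURCE B (Python) =====
-- def read_tag_type(tag_str):
--     cands = [k for k in (tag_str.find(' '), tag_str.find('>')) if k != -1]
--     idx = min(cands) if cands else len(tag_str)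
--     prefix = tag_str[:idx]
--     return ''.join(c for c in prefix if c != '<')
-- ===== Notes on version B (the rewrite author's own statement) =====
-- stated objective: faster
-- what changed: Replaces A's index-driven while loop with quadratic string concatenation by a find-the-boundary / slice / filter-join decomposition using str.find and a single join.
import Mathlib
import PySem

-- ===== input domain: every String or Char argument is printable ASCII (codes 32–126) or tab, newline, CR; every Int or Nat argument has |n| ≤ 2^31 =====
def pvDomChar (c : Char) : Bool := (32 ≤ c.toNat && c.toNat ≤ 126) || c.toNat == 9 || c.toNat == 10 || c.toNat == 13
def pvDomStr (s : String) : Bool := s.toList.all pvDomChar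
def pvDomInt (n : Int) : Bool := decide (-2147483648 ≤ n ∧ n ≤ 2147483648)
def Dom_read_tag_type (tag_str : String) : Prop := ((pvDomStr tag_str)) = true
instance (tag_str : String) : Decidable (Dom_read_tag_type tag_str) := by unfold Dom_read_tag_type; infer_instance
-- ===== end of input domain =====

-- B replaces A's index-driven while loop by a find-boundary / slice / filter-join decomposition; return value proved equal on all inputs.


-- ===== PORT A =====
-- the while loop over i: structural recursion over the remaining characters, acc = tag_type
def readTagLoop : List Char → List Char → List Char
  | [], acc => acc
  | c :: rest, acc =>
    if c = ' ' ∨ c = '>' then acc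
    else if c ≠ '<' then readTagLoop rest (acc ++ [c])
    else readTagLoop rest acc

def read_tag_type (tag_str : String) : String :=
  String.ofList (readTagLoop tag_str.toList [])

-- ===== PORT B =====
def read_tag_type_alt (tag_str : String) : String :=
  let cands := [PySem.Str.find tag_str " ", PySem.Str.find tag_str ">"].filter (fun k => k != -1)
  let idx : Int :=
    match PySem.List.min? cands id with
    | some m => m
    | none => (PySem.Str.len tag_str : Int)
  let pre := PySem.Str.slice tag_str none (some idx)
  PySem.Str.join "" ((pre.toList.filter (fun c => c != '<')).map (fun c => String.ofList [c]))

-- ===== PRECONDITION & SPEC =====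
def Spec_read_tag_type (tag_str : String) (out : String) : Prop := out = read_tag_type_alt tag_str
instance (tag_str : String) (out : String) : Decidable (Spec_read_tag_type tag_str out) := by unfold Spec_read_tag_type; infer_instance

-- ===== CLAIM (what is proved, stated in full; the proofs are below) =====
def Claim_equal_read_tag_type : Prop := ∀ (tag_str : String), Dom_read_tag_type tag_str → Spec_read_tag_type tag_str (read_tag_type tag_str)

-- ===== LEMMAS AND PROOFS =====

-- the loop guard/filter predicate, named so that simp does not re-normalise it
def pvQ : Char → Bool := fun c => !(c == ' ' || c == '>')

theorem pvQ_space : pvQ ' ' = false := rfl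
theorem pvQ_gt : pvQ '>' = false := rfl
theorem pvQ_true {c : Char} (h1 : c ≠ ' ') (h2 : c ≠ '>') : pvQ c = true := by
  simp [pvQ, h1, h2]

-- A's loop appends, to the accumulator, the non-'<' characters before the first ' ' or '>'
theorem readTagLoop_eq (l acc : List Char) :
    readTagLoop l acc = acc ++ (l.takeWhile pvQ).filter (fun c => c != '<') := by
  induction l generalizing acc with
  | nil => simp [readTagLoop]
  | cons c rest ih =>
    by_cases h : c = ' ' ∨ c = '>'
    · have hb : pvQ c = false := by rcases h with h | h <;> subst h <;> rfl
      simp [readTagLoop, h, List.takeWhile_cons, hb]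
    · have h1 : c ≠ ' ' := fun hc => h (Or.inl hc)
      have h2' : c ≠ '>' := fun hc => h (Or.inr hc)
      have hb : pvQ c = true := pvQ_true h1 h2'
      by_cases h2 : c = '<'
      · subst h2
        simp [readTagLoop, h, ih, List.takeWhile_cons, hb, List.filter_cons]
      · simp [readTagLoop, h, h2, ih, List.takeWhile_cons, hb, List.filter_cons]

theorem singleton_prefix_drop (c : Char) (l : List Char) (k : Nat) :
    ([c] <+: l.drop k) ↔ l[k]? = some c := by
  rw [← List.head?_drop]
  cases l.drop k with
  | nil => simp
  | cons a t => simp [List.cons_prefix_iff]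

theorem singleton_infix_iff_mem (c : Char) (l : List Char) : ([c] <:+: l) ↔ c ∈ l := by
  constructor
  · intro h; exact h.mem (by simp)
  · intro h; obtain ⟨s, t, rfl⟩ := List.append_of_mem h
    exact ⟨s, t, by simp⟩

-- characterisation of the first single-character occurrence
theorem find_single_spec (l : List Char) (c : Char) (h : 0 ≤ PySem.Chars.find l [c]) :
    l[(PySem.Chars.find l [c]).toNat]? = some c ∧
      ∀ k < (PySem.Chars.find l [c]).toNat, l[k]? ≠ some c := by
  obtain ⟨h1, h2⟩ := PySem.Chars.find_spec (s := l) (sub := [c]) h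
  refine ⟨(singleton_prefix_drop c l _).1 h1, fun k hk hc => h2 k hk ?_⟩
  exact (singleton_prefix_drop c l k).2 hc

theorem not_mem_of_find_neg (l : List Char) (c : Char)
    (h : PySem.Chars.find l [c] = -1) : c ∉ l := by
  have := (PySem.Chars.find_eq_neg_one_iff l [c]).1 h
  exact fun hm => this ((singleton_infix_iff_mem c l).2 hm)

-- the prefix up to the first ' '/'>' boundary is exactly the takeWhile
theorem take_eq_takeWhile (l : List Char) (m : Nat) (hm : m ≤ l.length)
    (hlt : ∀ k, k < m → l[k]? ≠ some ' ' ∧ l[k]? ≠ some '>')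
    (hend : m = l.length ∨ l[m]? = some ' ' ∨ l[m]? = some '>') :
    l.take m = l.takeWhile pvQ := by
  induction l generalizing m with
  | nil => simp
  | cons c rest ih =>
    cases m with
    | zero =>
      rcases hend with h | h | h
      · simp at h
      all_goals
        simp at h
        subst h
        simp [List.takeWhile_cons, pvQ_space, pvQ_gt]
    | succ m' =>
      have h0 := hlt 0 (Nat.succ_pos _)
      simp at h0
      have hb : pvQ c = true := pvQ_true h0.1 h0.2
      simp only [List.take_succ_cons, List.takeWhile_cons, hb, if_true, List.cons.injEq, true_and]
      refine ih m' (by simpa using hm) (fun k hk => ?_) ?_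
      · have := hlt (k+1) (by omega)
        simpa using this
      · rcases hend with h | h | h
        · left; simpa using h
        · right; left; simpa using h
        · right; right; simpa using h

theorem takeWhile_eq_self_of_no_boundary (l : List Char) (hs : ' ' ∉ l) (hg : '>' ∉ l) :
    l.takeWhile pvQ = l := by
  induction l with
  | nil => simp
  | cons c rest ih =>
    simp at hs hg
    have h1 : c ≠ ' ' := fun hc => hs.1 hc.symm
    have h2 : c ≠ '>' := fun hc => hg.1 hc.symm
    simp [List.takeWhile_cons, pvQ_true h1 h2, ih hs.2 hg.2]

-- take up to a boundary position (a ' ' or '>' with none before) is the takeWhile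
theorem boundary_take (l : List Char) (m : Nat)
    (hat : l[m]? = some ' ' ∨ l[m]? = some '>')
    (hbef : ∀ k, k < m → l[k]? ≠ some ' ' ∧ l[k]? ≠ some '>') :
    l.take m = l.takeWhile pvQ := by
  have hlt : m < l.length := by
    rcases hat with h | h <;> exact (List.getElem?_eq_some_iff.1 h).1
  exact take_eq_takeWhile l m (Nat.le_of_lt hlt) hbef (Or.inr hat)

theorem slice_to_toNat (l : List Char) (n : Int) (hn : 0 ≤ n) :
    PySem.List.slice l none (some n) = l.take n.toNat := by
  have h2 : n = ((n.toNat : Nat) : Int) := by omega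
  conv_lhs => rw [h2]
  rw [PySem.List.slice_to_natCast]

theorem min2_eq (a b : Int) : PySem.List.min? [a, b] id = some (if b < a then b else a) := by
  simp [PySem.List.min?]
  split_ifs <;> rfl

-- B's computed slice is the takeWhile prefix
theorem alt_slice_eq (l : List Char) :
    (let cands := [PySem.Chars.find l [' '], PySem.Chars.find l ['>']].filter (fun k => k != -1)
     let idx : Int := match PySem.List.min? cands id with
       | some m => m
       | none => (l.length : Int)
     PySem.List.slice l none (some idx)) =
    l.takeWhile pvQ := by
  have hi1 := PySem.Chars.neg_one_le_find l [' ']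
  have hj1 := PySem.Chars.neg_one_le_find l ['>']
  set i := PySem.Chars.find l [' '] with hidef
  set j := PySem.Chars.find l ['>'] with hjdef
  by_cases hi : i = -1
  · by_cases hj : j = -1
    · have hs := not_mem_of_find_neg l ' ' hi
      have hg := not_mem_of_find_neg l '>' hj
      simp only [hi, hj]
      simp [PySem.List.min?]
      exact (takeWhile_eq_self_of_no_boundary l hs hg).symm
    · have hj0 : 0 ≤ j := by omega
      obtain ⟨hat, hbef⟩ := find_single_spec l '>' hj0
      have hs := not_mem_of_find_neg l ' ' hi
      simp only [hi, hj]
      simp [hj, PySem.List.min?]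
      rw [slice_to_toNat l j hj0]
      refine boundary_take l j.toNat (Or.inr hat) (fun k hk => ?_)
      exact ⟨fun h => hs (List.mem_of_getElem? h), hbef k hk⟩
  · have hi0 : 0 ≤ i := by omega
    obtain ⟨hati, hbefi⟩ := find_single_spec l ' ' hi0
    by_cases hj : j = -1
    · have hg := not_mem_of_find_neg l '>' hj
      simp only [hi, hj]
      simp [hi, hj, PySem.List.min?]
      rw [slice_to_toNat l i hi0]
      refine boundary_take l i.toNat (Or.inl hati) (fun k hk => ?_)
      exact ⟨hbefi k hk, fun h => hg (List.mem_of_getElem? h)⟩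
    · have hj0 : 0 ≤ j := by omega
      obtain ⟨hatj, hbefj⟩ := find_single_spec l '>' hj0
      simp only [hi, hj]
      simp [hi, hj, min2_eq]
      by_cases hlt : j < i
      · simp [hlt]
        rw [slice_to_toNat l j hj0]
        refine boundary_take l j.toNat (Or.inr hatj) (fun k hk => ?_)
        exact ⟨hbefi k (by omega), hbefj k hk⟩
      · simp [hlt]
        rw [slice_to_toNat l i hi0]
        refine boundary_take l i.toNat (Or.inl hati) (fun k hk => ?_)
        exact ⟨hbefi k hk, hbefj k (by omega)⟩

-- ===== VERDICT (by name: the statement is the Claim_ definition above) =====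
theorem read_tag_type_spec : Claim_equal_read_tag_type := by
  intro tag_str _
  unfold Spec_read_tag_type read_tag_type read_tag_type_alt
  rw [← String.toList_inj]
  have hslice := alt_slice_eq tag_str.toList
  simp only at hslice
  simp only [String.length_toList] at hslice
  simp only [readTagLoop_eq, List.nil_append]
  simp [PySem.Str.toList_join, List.map_map, Function.comp, pvQ]
  rw [hslice]
  simp only [Function.comp_def, String.toList_ofList]
  simp [PySem.Chars.join_nil_singletons]
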